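-- pv_equiv track=rewrite | github.com/Daba-byte/SWEA | IM대비/12712_파리퇴치3.py | spray_plus
-- ===== SOURCE A (Python) =====
-- def spray_plus(N, M, arr, x, y):
--     total_flies = 0
--     # 델타 방향 정의
--     directions = [(1, 0), (-1, 0), (0, 1), (0, -1)]  # 하, 상, 우, 좌
--
--     # 중심의 파리 수
--     total_flies += arr[x][y]
--
--     # 각 방향으로 M-1 칸만큼 스프레이 적용
--     for dx, dy in directions:
--         for step in range(1, M):
--             nx, ny = x + dx * step, y + dy * step
--             if 0 <= nx < N and 0 <= ny < N:
--                 total_flies += arr[nx][ny]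
--             else:
--                 break
--
--     return total_flies
-- ===== SOURCE B (Python) =====
-- def spray_plus(N, M, arr, x, y):
--     total = arr[x][y]
--     for i, row in enumerate(arr):
--         for j, v in enumerate(row):
--             if i < N and j < N and ((i == x and 0 < abs(j - y) < M) or (j == y and 0 < abs(i - x) < M)):
--                 total += v
--     return total
-- ===== Notes on version B (the rewrite author's own statement) =====
-- stated objective: alternative
-- what changed: Replaces A's four delta-vector walks with early break by one full-grid scan: the centre is read as given and every existing board cell (i<N, j<N) on a plus arm (same row/column, axis distance 1..M-1) is selected by a closed-form predicate.
-- outside the precondition, e.g. on spray_plus(1, 5, [[6, 3, 3], [9, 7, 3], [2, 3, 4]], 2, 0): A returns 2, B returns 8; on spray_plus(2, 3, [[1, 2], [3, 4]], -2, 0): A returns 1, B returns 2; on spray_plus(2, 2, [[1], [3, 4]], 0, 0): A raises IndexError, B returns 4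
import Mathlib
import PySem

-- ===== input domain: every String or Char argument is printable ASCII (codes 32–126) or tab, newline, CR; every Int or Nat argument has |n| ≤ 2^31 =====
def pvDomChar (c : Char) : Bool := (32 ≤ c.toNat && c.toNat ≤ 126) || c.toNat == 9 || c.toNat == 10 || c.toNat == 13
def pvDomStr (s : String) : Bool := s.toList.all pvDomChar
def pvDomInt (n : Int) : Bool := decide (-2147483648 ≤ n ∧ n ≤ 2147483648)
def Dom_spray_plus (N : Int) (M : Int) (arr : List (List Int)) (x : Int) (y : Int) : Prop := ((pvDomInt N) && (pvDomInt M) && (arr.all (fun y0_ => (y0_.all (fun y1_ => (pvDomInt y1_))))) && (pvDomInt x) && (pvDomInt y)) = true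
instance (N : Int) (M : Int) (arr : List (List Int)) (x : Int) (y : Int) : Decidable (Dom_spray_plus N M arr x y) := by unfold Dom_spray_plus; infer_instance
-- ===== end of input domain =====

-- B replaces A's four delta-vector walks (bounds check and break) by one full-grid scan: the centre
-- is read as given and a closed-form predicate selects every existing board cell on a plus arm.

-- ===== PORT A =====
-- arr[i][j] (total form; exact under Pre_, where all accessed indices are in range)
def pvCell (arr : List (List Int)) (i j : Int) : Int :=
  PySem.List.pyGetD (PySem.List.pyGetD arr i []) j 0

-- inner 'for step in range(1, M)' loop of A, with its early break: the remaining iteration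
-- count is the fuel, s is the current step value (range objects are lazy in Python)
def sprayArm (N : Int) (arr : List (List Int)) (x y dx dy : Int) : Nat → Int → Int → Int
  | 0, _, t => t
  | fuel + 1, s, t =>
    let nx := x + dx * s
    let ny := y + dy * s
    if 0 ≤ nx ∧ nx < N ∧ 0 ≤ ny ∧ ny < N then
      sprayArm N arr x y dx dy fuel (s + 1) (t + pvCell arr nx ny)
    else t

def spray_plus (N : Int) (M : Int) (arr : List (List Int)) (x : Int) (y : Int) : Int :=
  let total := 0 + pvCell arr x y
  ([((1:Int), (0:Int)), (-1, 0), (0, 1), (0, -1)]).foldl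
    (fun t d => sprayArm N arr x y d.1 d.2 (M - 1).toNat 1 t) total

-- ===== PORT B =====
-- B: the centre cell as given, plus one scan of the whole grid adding every existing board cell
-- (i < N, j < N) that lies on a plus arm: same row or column, axis distance strictly between 0 and M
def spray_plus_alt (N : Int) (M : Int) (arr : List (List Int)) (x : Int) (y : Int) : Int :=
  (PySem.List.enumerate arr 0).foldl (fun t p =>
    (PySem.List.enumerate p.2 0).foldl (fun t q =>
      if p.1 < N ∧ q.1 < N ∧
         ((p.1 = x ∧ 0 < |q.1 - y| ∧ |q.1 - y| < M) ∨ (q.1 = y ∧ 0 < |p.1 - x| ∧ |p.1 - x| < M))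
      then t + q.2 else t) t)
    (pvCell arr x y)

-- ===== PRECONDITION & SPEC =====
-- Pre_ admits the inputs on which A's walk visits exactly the board-clipped plus arms and raises
-- nothing: a centre index valid in Python's sense, arms that do not jump the board edge from
-- outside (the two max/min clauses), and every board cell an arm walks over actually present.
-- Outside it A raises IndexError or returns an accidental value (a wrapped negative centre with
-- arms cut by the break, or a centre beyond the board with partially walked arms).
def Pre_spray_plus (N : Int) (M : Int) (arr : List (List Int)) (x : Int) (y : Int) : Prop :=
  -(arr.length : Int) ≤ x ∧ x < (arr.length : Int) ∧
  -((PySem.List.pyGetD arr x []).length : Int) ≤ y ∧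
    y < ((PySem.List.pyGetD arr x []).length : Int) ∧
  (x ≤ N ∨ N + M - 1 ≤ x) ∧ (y ≤ N ∨ N + M - 1 ≤ y) ∧
  (-1 ≤ x ∨ x + M ≤ 0) ∧ (-1 ≤ y ∨ y + M ≤ 0) ∧
  (0 ≤ x ∧ x < N ∧ -1 ≤ y ∧ y + 1 < min N (y + M) →
      min N (y + M) ≤ ((PySem.List.pyGetD arr x []).length : Int)) ∧
  (0 ≤ y ∧ y < N →
      (min N (x+M) ≤ (arr.length : Int) ∨ min N (x+M) ≤ max (x+1) 0) ∧
      ∀ i ∈ PySem.List.pyRange (max (x+1) 0) (min (min N (x+M)) ((arr.length : Int))) 1,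
        y < ((PySem.List.pyGetD arr i []).length : Int)) ∧
  (0 ≤ y ∧ y < N → ∀ i ∈ PySem.List.pyRange (max 0 (x-M+1)) (min x N) 1,
      y < ((PySem.List.pyGetD arr i []).length : Int))
instance (N : Int) (M : Int) (arr : List (List Int)) (x : Int) (y : Int) : Decidable (Pre_spray_plus N M arr x y) := by unfold Pre_spray_plus; infer_instance

def pvWitness_spray_plus : Int × Int × List (List Int) × Int × Int :=
  (3, 2, [[1, 2, 3], [4, 5, 6], [7, 8, 9]], 1, 1)

def Spec_spray_plus (N : Int) (M : Int) (arr : List (List Int)) (x : Int) (y : Int) (out : Int) : Prop := out = spray_plus_alt N M arr x y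
instance (N : Int) (M : Int) (arr : List (List Int)) (x : Int) (y : Int) (out : Int) : Decidable (Spec_spray_plus N M arr x y out) := by unfold Spec_spray_plus; infer_instance

-- ===== CLAIM (what is proved, stated in full; the proofs are below) =====
def Claim_equal_spray_plus : Prop := ∀ (N : Int) (M : Int) (arr : List (List Int)) (x : Int) (y : Int), Dom_spray_plus N M arr x y → Pre_spray_plus N M arr x y → Spec_spray_plus N M arr x y (spray_plus N M arr x y)

-- ===== LEMMAS AND PROOFS =====

-- the common closed form both programs are reduced to: centre + four board-clipped arm sums
def hTermL (N M : Int) (row : List Int) (y : Int) : Int :=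
  ((PySem.List.pyRange (max 0 (y - M + 1)) (min y N) 1).map (fun j => PySem.List.pyGetD row j 0)).sum
def hTermR (N M : Int) (row : List Int) (y : Int) : Int :=
  ((PySem.List.pyRange (max (y+1) 0) (min N (y + M)) 1).map (fun j => PySem.List.pyGetD row j 0)).sum
def vTermU (N M : Int) (arr : List (List Int)) (x y : Int) : Int :=
  ((PySem.List.pyRange (max 0 (x - M + 1)) (min x N) 1).map (fun i => pvCell arr i y)).sum
def vTermD (N M : Int) (arr : List (List Int)) (x y : Int) : Int :=
  ((PySem.List.pyRange (max (x+1) 0) (min N (x + M)) 1).map (fun i => pvCell arr i y)).sum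
def common (N M : Int) (arr : List (List Int)) (x y : Int) : Int :=
  pvCell arr x y
  + (if 0 ≤ x ∧ x < N then
      hTermL N M (PySem.List.pyGetD arr x []) y + hTermR N M (PySem.List.pyGetD arr x []) y else 0)
  + (if 0 ≤ y ∧ y < N then vTermU N M arr x y + vTermD N M arr x y else 0)

-- ---------- small generic helpers ----------

lemma pyGetD_oob {α : Type} (xs : List α) (i : Int) (d : α) (h : (xs.length : Int) ≤ i) :
    PySem.List.pyGetD xs i d = d := by
  have h0 : 0 ≤ i := by omega
  have h1 : ¬ i < (xs.length : Int) := by omega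
  simp [PySem.List.pyGetD, PySem.List.pyGet?, PySem.List.pyIdx?, h0, h1]

lemma pyGetD_nil {α : Type} (i : Int) (d : α) :
    PySem.List.pyGetD ([] : List α) i d = d := by
  simp [PySem.List.pyGetD, PySem.List.pyGet?, PySem.List.pyIdx?]

lemma ite_or_add (P Q : Prop) [Decidable P] [Decidable Q] (h : ¬ (P ∧ Q)) (v : Int) :
    (if P ∨ Q then v else 0) = (if P then v else 0) + (if Q then v else 0) := by
  by_cases hp : P <;> by_cases hq : Q
  · exact absurd ⟨hp, hq⟩ h
  · simp [hp, hq]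
  · simp [hp, hq]
  · simp [hp, hq]

-- a fold that conditionally adds is the initial value plus a sum of indicators
lemma foldl_if_add {α : Type} (P : α → Prop) [DecidablePred P] (f : α → Int) :
    ∀ (l : List α) (t : Int),
      l.foldl (fun t q => if P q then t + f q else t) t
        = t + (l.map (fun q => if P q then f q else 0)).sum := by
  intro l
  induction l with
  | nil => intro t; simp
  | cons a l ih =>
    intro t
    simp only [List.foldl_cons, List.map_cons, List.sum_cons, ih]
    split_ifs <;> ring

-- a fold whose step adds f p (pointwise, for members) is the initial value plus the sum of f
lemma foldl_eq_add_sum {α : Type} (step : Int → α → Int) (f : α → Int) :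
    ∀ (l : List α), (∀ t : Int, ∀ p ∈ l, step t p = t + f p) →
      ∀ t : Int, l.foldl step t = t + (l.map f).sum := by
  intro l
  induction l with
  | nil => intro _ t; simp
  | cons a l ih =>
    intro h t
    simp only [List.foldl_cons, List.map_cons, List.sum_cons]
    rw [h t a (List.mem_cons_self), ih (fun t p hp => h t p (List.mem_cons_of_mem _ hp))]
    ring

-- interval sums over pyRange, and their splitting / vanishing
lemma sum_range_split (a m b : Int) (g : Int → Int) (h1 : a ≤ m) (h2 : m ≤ b) :
    ((PySem.List.pyRange a b 1).map g).sum
      = ((PySem.List.pyRange a m 1).map g).sum + ((PySem.List.pyRange m b 1).map g).sum := by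
  rw [PySem.List.pyRange_one_append a m b h1 h2, List.map_append, List.sum_append]

lemma sum_range_zero (a b : Int) (g : Int → Int) (h : ∀ j, a ≤ j → j < b → g j = 0) :
    ((PySem.List.pyRange a b 1).map g).sum = 0 := by
  apply List.sum_eq_zero
  intro v hv
  obtain ⟨j, hj, rfl⟩ := List.mem_map.mp hv
  obtain ⟨h1, h2⟩ := (PySem.List.mem_pyRange_one).mp hj
  exact h j h1 h2

lemma sum_range_congr (a b : Int) (g g' : Int → Int) (h : ∀ j, a ≤ j → j < b → g j = g' j) :
    ((PySem.List.pyRange a b 1).map g).sum = ((PySem.List.pyRange a b 1).map g').sum := by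
  congr 1
  apply List.map_congr_left
  intro j hj
  obtain ⟨h1, h2⟩ := (PySem.List.mem_pyRange_one).mp hj
  exact h j h1 h2

-- an indicator sum over [0, L) that picks exactly one index m equals g m
lemma sum_pick_y (L m : Int) (g : Int → Int) (hm0 : 0 ≤ m) (hmL : m < L)
    (hz : ∀ j, 0 ≤ j → j < L → j ≠ m → g j = 0) :
    ((PySem.List.pyRange 0 L 1).map g).sum = g m := by
  rw [sum_range_split 0 m L g hm0 (by omega),
      sum_range_split m (m+1) L g (by omega) (by omega),
      sum_range_zero 0 m g (fun j h1 h2 => hz j h1 (by omega) (by omega)),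
      sum_range_zero (m+1) L g (fun j h1 h2 => hz j (by omega) h2 (by omega)),
      PySem.List.pyRange_one_singleton]
  simp

-- an indicator over [0, L) whose condition is the interval [a, b) sums to the plain interval sum,
-- provided g vanishes from L on (missing cells contribute nothing)
lemma sum_ind (f : Int → Int) (P : Int → Prop) [DecidablePred P] (L a b : Int)
    (hP : ∀ j, 0 ≤ j → j < L → (P j ↔ a ≤ j ∧ j < b)) (ha : 0 ≤ a)
    (hpad : ∀ j, L ≤ j → f j = 0) :
    ((PySem.List.pyRange 0 L 1).map (fun j => if P j then f j else 0)).sum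
      = ((PySem.List.pyRange a b 1).map f).sum := by
  rw [sum_range_congr 0 L _ (fun j => if a ≤ j ∧ j < b then f j else 0)
      (fun j h1 h2 => by
        by_cases hp : P j
        · simp only [if_pos hp, if_pos ((hP j h1 h2).mp hp)]
        · simp only [if_neg hp, if_neg (fun hc => hp ((hP j h1 h2).mpr hc))])]
  by_cases hab : b ≤ a
  · rw [sum_range_zero 0 L _ (fun j h1 h2 => if_neg (by omega)),
        PySem.List.pyRange_one_eq_nil hab]
    simp
  · by_cases hLa : L ≤ a
    · rw [sum_range_zero 0 L _ (fun j h1 h2 => if_neg (by omega)),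
          sum_range_zero a b f (fun j h1 h2 => hpad j (by omega))]
    · have hm1 : a ≤ min b L := by omega
      rw [sum_range_split 0 a L _ ha (by omega),
          sum_range_split a (min b L) L _ hm1 (by omega),
          sum_range_zero 0 a _ (fun j h1 h2 => if_neg (by omega)),
          sum_range_congr a (min b L) _ f (fun j h1 h2 => if_pos (by omega)),
          sum_range_zero (min b L) L _ (fun j h1 h2 => by
            by_cases hbL : b ≤ L
            · exact if_neg (by omega)
            · exact (by omega : False).elim),
          sum_range_split a (min b L) b f hm1 (by omega),
          sum_range_zero (min b L) b f (fun j h1 h2 => by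
            by_cases hbL : b ≤ L
            · exact (by omega : False).elim
            · exact hpad j (by omega))]
      ring

-- ---------- A-side: each break-walk equals a clamped range sum ----------

lemma sprayArm_stop (N : Int) (arr : List (List Int)) (x y dx dy : Int) (fuel : Nat) (s t : Int)
    (h : ¬ (0 ≤ x + dx * s ∧ x + dx * s < N ∧ 0 ≤ y + dy * s ∧ y + dy * s < N)) :
    sprayArm N arr x y dx dy (fuel + 1) s t = t := by
  simp only [sprayArm, if_neg h]

-- right arm (dy = 1): the break-loop over consecutive steps c, c+1, … sums the clamped range
lemma arm_right (N : Int) (arr : List (List Int)) (x y : Int)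
    (hx0 : 0 ≤ x) (hxN : x < N) (hy0 : -1 ≤ y) :
    ∀ (k : ℕ) (c t : Int), 1 ≤ c →
      sprayArm N arr x y 0 1 k c t
        = t + ((PySem.List.pyRange (y + c) (min N (y + c + k)) 1).map (fun j => pvCell arr x j)).sum := by
  intro k
  induction k with
  | zero =>
    intro c t hc
    simp [sprayArm, PySem.List.pyRange_one_eq_nil (by omega : min N (y + c + (0:ℕ)) ≤ y + c)]
  | succ k ih =>
    intro c t hc
    by_cases h : y + c < N
    · have hcond : 0 ≤ x + 0 * c ∧ x + 0 * c < N ∧ 0 ≤ y + 1 * c ∧ y + 1 * c < N := by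
        constructor <;> [omega; constructor] <;> [skip; constructor] <;> omega
      simp only [sprayArm, if_pos hcond]
      rw [ih (c+1) _ (by omega)]
      rw [PySem.List.pyRange_one_cons (by omega : y + c < min N (y + c + ((k:ℕ)+1:ℕ)))]
      simp only [List.map_cons, List.sum_cons]
      push_cast
      have harg : y + 1 * c = y + c := by ring
      rw [harg]
      have : min N (y + c + ((k:Int)+1)) = min N (y + (c+1) + (k:Int)) := by ring_nf
      rw [show y + c + 1 = y + (c+1) by ring, this]
      ring
    · have hcond : ¬ (0 ≤ x + 0 * c ∧ x + 0 * c < N ∧ 0 ≤ y + 1 * c ∧ y + 1 * c < N) := by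
        intro hc'; omega
      simp only [sprayArm, if_neg hcond]
      rw [PySem.List.pyRange_one_eq_nil (by omega : min N (y + c + ((k:ℕ)+1:ℕ)) ≤ y + c)]
      simp

-- left arm (dy = -1): the break-loop walking down from y-c sums the clamped ascending range
lemma arm_left (N : Int) (arr : List (List Int)) (x y : Int)
    (hx0 : 0 ≤ x) (hxN : x < N) (hyN : y ≤ N) :
    ∀ (k : ℕ) (c t : Int), 1 ≤ c →
      sprayArm N arr x y 0 (-1) k c t
        = t + ((PySem.List.pyRange (max 0 (y - c - k + 1)) (y - c + 1) 1).map (fun j => pvCell arr x j)).sum := by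
  intro k
  induction k with
  | zero =>
    intro c t hc
    simp [sprayArm, PySem.List.pyRange_one_eq_nil (by omega : y - c + 1 ≤ max 0 (y - c - (0:ℕ) + 1))]
  | succ k ih =>
    intro c t hc
    by_cases h : 1 ≤ y - c
    · have hcond : 0 ≤ x + 0 * c ∧ x + 0 * c < N ∧ 0 ≤ y + (-1) * c ∧ y + (-1) * c < N := by
        constructor <;> [omega; constructor] <;> [skip; constructor] <;> omega
      simp only [sprayArm, if_pos hcond]
      rw [ih (c+1) _ (by omega)]
      have harg : y + (-1) * c = y - c := by ring
      rw [harg]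
      have hk1 : ((k+1:ℕ):Int) = (k:Int) + 1 := by push_cast; ring
      rw [hk1]
      have hlo : max 0 (y - (c+1) - (k:Int) + 1) = max 0 (y - c - ((k:Int)+1) + 1) := by omega
      rw [hlo]
      set lo := max 0 (y - c - ((k:Int)+1) + 1) with hlodef
      have hsplit : PySem.List.pyRange lo (y - c + 1) 1
          = PySem.List.pyRange lo (y - c) 1 ++ [y - c] := by
        rw [PySem.List.pyRange_one_succ_right (by omega : lo ≤ y - c)]
      rw [show y - (c+1) + 1 = y - c by ring] at *
      rw [hsplit]
      simp only [List.map_append, List.sum_append, List.map_cons, List.map_nil, List.sum_cons,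
        List.sum_nil]
      ring
    · by_cases h0 : y - c = 0
      · have hcond : 0 ≤ x + 0 * c ∧ x + 0 * c < N ∧ 0 ≤ y + (-1) * c ∧ y + (-1) * c < N := by
          constructor <;> [omega; constructor] <;> [skip; constructor] <;> omega
        simp only [sprayArm, if_pos hcond]
        rw [ih (c+1) _ (by omega)]
        have harg : y + (-1) * c = y - c := by ring
        rw [harg]
        rw [PySem.List.pyRange_one_eq_nil (by omega : y - (c+1) + 1 ≤ max 0 (y - (c+1) - (k:ℕ) + 1))]
        have hsing : PySem.List.pyRange (max 0 (y - c - ((k:ℕ)+1:ℕ) + 1)) (y - c + 1) 1 = [y - c] := by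
          rw [show max 0 (y - c - ((k:ℕ)+1:ℕ) + 1) = y - c by omega]
          exact PySem.List.pyRange_one_singleton _
        rw [hsing]
        simp [h0]
      · have hcond : ¬ (0 ≤ x + 0 * c ∧ x + 0 * c < N ∧ 0 ≤ y + (-1) * c ∧ y + (-1) * c < N) := by
          intro hc'; omega
        simp only [sprayArm, if_neg hcond]
        rw [PySem.List.pyRange_one_eq_nil (by omega : y - c + 1 ≤ max 0 (y - c - ((k:ℕ)+1:ℕ) + 1))]
        simp

-- down arm (dx = 1)
lemma arm_down (N : Int) (arr : List (List Int)) (x y : Int)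
    (hy0 : 0 ≤ y) (hyN : y < N) (hx0 : -1 ≤ x) :
    ∀ (k : ℕ) (c t : Int), 1 ≤ c →
      sprayArm N arr x y 1 0 k c t
        = t + ((PySem.List.pyRange (x + c) (min N (x + c + k)) 1).map (fun i => pvCell arr i y)).sum := by
  intro k
  induction k with
  | zero =>
    intro c t hc
    simp [sprayArm, PySem.List.pyRange_one_eq_nil (by omega : min N (x + c + (0:ℕ)) ≤ x + c)]
  | succ k ih =>
    intro c t hc
    by_cases h : x + c < N
    · have hcond : 0 ≤ x + 1 * c ∧ x + 1 * c < N ∧ 0 ≤ y + 0 * c ∧ y + 0 * c < N := by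
        constructor <;> [omega; constructor] <;> [skip; constructor] <;> omega
      simp only [sprayArm, if_pos hcond]
      rw [ih (c+1) _ (by omega)]
      rw [PySem.List.pyRange_one_cons (by omega : x + c < min N (x + c + ((k:ℕ)+1:ℕ)))]
      simp only [List.map_cons, List.sum_cons]
      push_cast
      have harg : x + 1 * c = x + c := by ring
      rw [harg]
      have : min N (x + c + ((k:Int)+1)) = min N (x + (c+1) + (k:Int)) := by ring_nf
      rw [show x + c + 1 = x + (c+1) by ring, this]
      ring
    · have hcond : ¬ (0 ≤ x + 1 * c ∧ x + 1 * c < N ∧ 0 ≤ y + 0 * c ∧ y + 0 * c < N) := by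
        intro hc'; omega
      simp only [sprayArm, if_neg hcond]
      rw [PySem.List.pyRange_one_eq_nil (by omega : min N (x + c + ((k:ℕ)+1:ℕ)) ≤ x + c)]
      simp

-- up arm (dx = -1)
lemma arm_up (N : Int) (arr : List (List Int)) (x y : Int)
    (hy0 : 0 ≤ y) (hyN : y < N) (hxN : x ≤ N) :
    ∀ (k : ℕ) (c t : Int), 1 ≤ c →
      sprayArm N arr x y (-1) 0 k c t
        = t + ((PySem.List.pyRange (max 0 (x - c - k + 1)) (x - c + 1) 1).map (fun i => pvCell arr i y)).sum := by
  intro k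
  induction k with
  | zero =>
    intro c t hc
    simp [sprayArm, PySem.List.pyRange_one_eq_nil (by omega : x - c + 1 ≤ max 0 (x - c - (0:ℕ) + 1))]
  | succ k ih =>
    intro c t hc
    by_cases h : 1 ≤ x - c
    · have hcond : 0 ≤ x + (-1) * c ∧ x + (-1) * c < N ∧ 0 ≤ y + 0 * c ∧ y + 0 * c < N := by
        constructor <;> [omega; constructor] <;> [skip; constructor] <;> omega
      simp only [sprayArm, if_pos hcond]
      rw [ih (c+1) _ (by omega)]
      have harg : x + (-1) * c = x - c := by ring
      rw [harg]
      have hk1 : ((k+1:ℕ):Int) = (k:Int) + 1 := by push_cast; ring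
      rw [hk1]
      have hlo : max 0 (x - (c+1) - (k:Int) + 1) = max 0 (x - c - ((k:Int)+1) + 1) := by omega
      rw [hlo]
      set lo := max 0 (x - c - ((k:Int)+1) + 1) with hlodef
      have hsplit : PySem.List.pyRange lo (x - c + 1) 1
          = PySem.List.pyRange lo (x - c) 1 ++ [x - c] := by
        rw [PySem.List.pyRange_one_succ_right (by omega : lo ≤ x - c)]
      rw [show x - (c+1) + 1 = x - c by ring] at *
      rw [hsplit]
      simp only [List.map_append, List.sum_append, List.map_cons, List.map_nil, List.sum_cons,
        List.sum_nil]
      ring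
    · by_cases h0 : x - c = 0
      · have hcond : 0 ≤ x + (-1) * c ∧ x + (-1) * c < N ∧ 0 ≤ y + 0 * c ∧ y + 0 * c < N := by
          constructor <;> [omega; constructor] <;> [skip; constructor] <;> omega
        simp only [sprayArm, if_pos hcond]
        rw [ih (c+1) _ (by omega)]
        have harg : x + (-1) * c = x - c := by ring
        rw [harg]
        rw [PySem.List.pyRange_one_eq_nil (by omega : x - (c+1) + 1 ≤ max 0 (x - (c+1) - (k:ℕ) + 1))]
        have hsing : PySem.List.pyRange (max 0 (x - c - ((k:ℕ)+1:ℕ) + 1)) (x - c + 1) 1 = [x - c] := by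
          rw [show max 0 (x - c - ((k:ℕ)+1:ℕ) + 1) = x - c by omega]
          exact PySem.List.pyRange_one_singleton _
        rw [hsing]
        simp [h0]
      · have hcond : ¬ (0 ≤ x + (-1) * c ∧ x + (-1) * c < N ∧ 0 ≤ y + 0 * c ∧ y + 0 * c < N) := by
          intro hc'; omega
        simp only [sprayArm, if_neg hcond]
        rw [PySem.List.pyRange_one_eq_nil (by omega : x - c + 1 ≤ max 0 (x - c - ((k:ℕ)+1:ℕ) + 1))]
        simp

-- total value of A's right arm
lemma armR_total (N M : Int) (arr : List (List Int)) (x y : Int)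
    (hE : -1 ≤ y ∨ y + M ≤ 0) (t : Int) :
    sprayArm N arr x y 0 1 (M - 1).toNat 1 t
      = t + (if 0 ≤ x ∧ x < N then hTermR N M (PySem.List.pyGetD arr x []) y else 0) := by
  by_cases hgx : 0 ≤ x ∧ x < N
  · rw [if_pos hgx]
    by_cases hy : -1 ≤ y
    · rw [arm_right N arr x y hgx.1 hgx.2 hy _ 1 t (le_refl 1)]
      unfold hTermR
      by_cases hM : 1 ≤ M
      · rw [show max (y+1) 0 = y + 1 by omega,
            show min N (y + 1 + ((M-1).toNat : Int)) = min N (y + M) by omega]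
        rfl
      · rw [PySem.List.pyRange_one_eq_nil (by omega : min N (y + 1 + ((M-1).toNat : Int)) ≤ y + 1),
            PySem.List.pyRange_one_eq_nil (by omega : min N (y + M) ≤ max (y+1) 0)]
        rfl
    · have hyM : y + M ≤ 0 := by rcases hE with h | h <;> omega
      have hstop : sprayArm N arr x y 0 1 (M - 1).toNat 1 t = t := by
        by_cases hM : 2 ≤ M
        · obtain ⟨k, hk⟩ : ∃ k, (M - 1).toNat = k + 1 := ⟨(M-2).toNat, by omega⟩
          rw [hk]
          exact sprayArm_stop N arr x y 0 1 k 1 t (by intro hc; omega)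
        · rw [show (M - 1).toNat = 0 by omega]
          rfl
      rw [hstop]
      unfold hTermR
      rw [PySem.List.pyRange_one_eq_nil (by omega : min N (y + M) ≤ max (y+1) 0)]
      simp
  · rw [if_neg hgx]
    have hstop : sprayArm N arr x y 0 1 (M - 1).toNat 1 t = t := by
      by_cases hM : 2 ≤ M
      · obtain ⟨k, hk⟩ : ∃ k, (M - 1).toNat = k + 1 := ⟨(M-2).toNat, by omega⟩
        rw [hk]
        exact sprayArm_stop N arr x y 0 1 k 1 t (by intro hc; omega)
      · rw [show (M - 1).toNat = 0 by omega]
        rfl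
    rw [hstop]; ring

-- total value of A's left arm
lemma armL_total (N M : Int) (arr : List (List Int)) (x y : Int)
    (hE : y ≤ N ∨ N + M - 1 ≤ y) (t : Int) :
    sprayArm N arr x y 0 (-1) (M - 1).toNat 1 t
      = t + (if 0 ≤ x ∧ x < N then hTermL N M (PySem.List.pyGetD arr x []) y else 0) := by
  by_cases hgx : 0 ≤ x ∧ x < N
  · rw [if_pos hgx]
    by_cases hy : y ≤ N
    · rw [arm_left N arr x y hgx.1 hgx.2 hy _ 1 t (le_refl 1)]
      unfold hTermL
      by_cases hM : 1 ≤ M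
      · rw [show max 0 (y - 1 - ((M-1).toNat : Int) + 1) = max 0 (y - M + 1) by omega,
            show y - 1 + 1 = min y N by omega]
        rfl
      · rw [PySem.List.pyRange_one_eq_nil
              (by omega : y - 1 + 1 ≤ max 0 (y - 1 - ((M-1).toNat : Int) + 1)),
            PySem.List.pyRange_one_eq_nil (by omega : min y N ≤ max 0 (y - M + 1))]
        rfl
    · have hyM : N + M - 1 ≤ y := by rcases hE with h | h <;> omega
      have hstop : sprayArm N arr x y 0 (-1) (M - 1).toNat 1 t = t := by
        by_cases hM : 2 ≤ M
        · obtain ⟨k, hk⟩ : ∃ k, (M - 1).toNat = k + 1 := ⟨(M-2).toNat, by omega⟩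
          rw [hk]
          exact sprayArm_stop N arr x y 0 (-1) k 1 t (by intro hc; omega)
        · rw [show (M - 1).toNat = 0 by omega]
          rfl
      rw [hstop]
      unfold hTermL
      rw [PySem.List.pyRange_one_eq_nil (by omega : min y N ≤ max 0 (y - M + 1))]
      simp
  · rw [if_neg hgx]
    have hstop : sprayArm N arr x y 0 (-1) (M - 1).toNat 1 t = t := by
      by_cases hM : 2 ≤ M
      · obtain ⟨k, hk⟩ : ∃ k, (M - 1).toNat = k + 1 := ⟨(M-2).toNat, by omega⟩
        rw [hk]
        exact sprayArm_stop N arr x y 0 (-1) k 1 t (by intro hc; omega)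
      · rw [show (M - 1).toNat = 0 by omega]
        rfl
    rw [hstop]; ring

-- total value of A's down arm
lemma armD_total (N M : Int) (arr : List (List Int)) (x y : Int)
    (hE : -1 ≤ x ∨ x + M ≤ 0) (t : Int) :
    sprayArm N arr x y 1 0 (M - 1).toNat 1 t
      = t + (if 0 ≤ y ∧ y < N then vTermD N M arr x y else 0) := by
  by_cases hgy : 0 ≤ y ∧ y < N
  · rw [if_pos hgy]
    by_cases hx : -1 ≤ x
    · rw [arm_down N arr x y hgy.1 hgy.2 hx _ 1 t (le_refl 1)]
      unfold vTermD
      by_cases hM : 1 ≤ M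
      · rw [show max (x+1) 0 = x + 1 by omega,
            show min N (x + 1 + ((M-1).toNat : Int)) = min N (x + M) by omega]
      · rw [PySem.List.pyRange_one_eq_nil (by omega : min N (x + 1 + ((M-1).toNat : Int)) ≤ x + 1),
            PySem.List.pyRange_one_eq_nil (by omega : min N (x + M) ≤ max (x+1) 0)]
    · have hxM : x + M ≤ 0 := by rcases hE with h | h <;> omega
      have hstop : sprayArm N arr x y 1 0 (M - 1).toNat 1 t = t := by
        by_cases hM : 2 ≤ M
        · obtain ⟨k, hk⟩ : ∃ k, (M - 1).toNat = k + 1 := ⟨(M-2).toNat, by omega⟩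
          rw [hk]
          exact sprayArm_stop N arr x y 1 0 k 1 t (by intro hc; omega)
        · rw [show (M - 1).toNat = 0 by omega]
          rfl
      rw [hstop]
      unfold vTermD
      rw [PySem.List.pyRange_one_eq_nil (by omega : min N (x + M) ≤ max (x+1) 0)]
      simp
  · rw [if_neg hgy]
    have hstop : sprayArm N arr x y 1 0 (M - 1).toNat 1 t = t := by
      by_cases hM : 2 ≤ M
      · obtain ⟨k, hk⟩ : ∃ k, (M - 1).toNat = k + 1 := ⟨(M-2).toNat, by omega⟩
        rw [hk]
        exact sprayArm_stop N arr x y 1 0 k 1 t (by intro hc; omega)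
      · rw [show (M - 1).toNat = 0 by omega]
        rfl
    rw [hstop]; ring

-- total value of A's up arm
lemma armU_total (N M : Int) (arr : List (List Int)) (x y : Int)
    (hE : x ≤ N ∨ N + M - 1 ≤ x) (t : Int) :
    sprayArm N arr x y (-1) 0 (M - 1).toNat 1 t
      = t + (if 0 ≤ y ∧ y < N then vTermU N M arr x y else 0) := by
  by_cases hgy : 0 ≤ y ∧ y < N
  · rw [if_pos hgy]
    by_cases hx : x ≤ N
    · rw [arm_up N arr x y hgy.1 hgy.2 hx _ 1 t (le_refl 1)]
      unfold vTermU
      by_cases hM : 1 ≤ M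
      · rw [show max 0 (x - 1 - ((M-1).toNat : Int) + 1) = max 0 (x - M + 1) by omega,
            show x - 1 + 1 = min x N by omega]
      · rw [PySem.List.pyRange_one_eq_nil
              (by omega : x - 1 + 1 ≤ max 0 (x - 1 - ((M-1).toNat : Int) + 1)),
            PySem.List.pyRange_one_eq_nil (by omega : min x N ≤ max 0 (x - M + 1))]
    · have hxM : N + M - 1 ≤ x := by rcases hE with h | h <;> omega
      have hstop : sprayArm N arr x y (-1) 0 (M - 1).toNat 1 t = t := by
        by_cases hM : 2 ≤ M
        · obtain ⟨k, hk⟩ : ∃ k, (M - 1).toNat = k + 1 := ⟨(M-2).toNat, by omega⟩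
          rw [hk]
          exact sprayArm_stop N arr x y (-1) 0 k 1 t (by intro hc; omega)
        · rw [show (M - 1).toNat = 0 by omega]
          rfl
      rw [hstop]
      unfold vTermU
      rw [PySem.List.pyRange_one_eq_nil (by omega : min x N ≤ max 0 (x - M + 1))]
      simp
  · rw [if_neg hgy]
    have hstop : sprayArm N arr x y (-1) 0 (M - 1).toNat 1 t = t := by
      by_cases hM : 2 ≤ M
      · obtain ⟨k, hk⟩ : ∃ k, (M - 1).toNat = k + 1 := ⟨(M-2).toNat, by omega⟩
        rw [hk]
        exact sprayArm_stop N arr x y (-1) 0 k 1 t (by intro hc; omega)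
      · rw [show (M - 1).toNat = 0 by omega]
        rfl
    rw [hstop]; ring

-- A equals the common closed form
lemma a_eq_common (N M : Int) (arr : List (List Int)) (x y : Int)
    (hEx1 : x ≤ N ∨ N + M - 1 ≤ x) (hEy1 : y ≤ N ∨ N + M - 1 ≤ y)
    (hEx2 : -1 ≤ x ∨ x + M ≤ 0) (hEy2 : -1 ≤ y ∨ y + M ≤ 0) :
    spray_plus N M arr x y = common N M arr x y := by
  unfold spray_plus common
  simp only [List.foldl_cons, List.foldl_nil]
  rw [armD_total N M arr x y hEx2, armU_total N M arr x y hEx1,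
      armR_total N M arr x y hEy2, armL_total N M arr x y hEy1]
  by_cases hgx : 0 ≤ x ∧ x < N <;> by_cases hgy : 0 ≤ y ∧ y < N <;>
    simp [hgx, hgy] <;> ring

-- ---------- B-side: the filtered grid scan equals the same closed form ----------

-- per-row value of B's scan: the row-x arm cells plus (for any row) the column cell at y
def rowC (N M x y i : Int) (row : List Int) : Int :=
  (if i = x ∧ x < N then hTermL N M row y + hTermR N M row y else 0)
  + (if 0 ≤ y ∧ y < N ∧ i < N ∧ 0 < |i - x| ∧ |i - x| < M then PySem.List.pyGetD row y 0 else 0)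

-- inner loop of B over one row
lemma inner_row (N M x y i : Int) (row : List Int) (hi : 0 ≤ i) (t : Int) :
    (PySem.List.enumerate row 0).foldl (fun t q =>
        if i < N ∧ q.1 < N ∧
           ((i = x ∧ 0 < |q.1 - y| ∧ |q.1 - y| < M) ∨ (q.1 = y ∧ 0 < |i - x| ∧ |i - x| < M))
        then t + q.2 else t) t
      = t + rowC N M x y i row := by
  rw [foldl_if_add (fun q : Int × Int =>
        i < N ∧ q.1 < N ∧
          ((i = x ∧ 0 < |q.1 - y| ∧ |q.1 - y| < M) ∨ (q.1 = y ∧ 0 < |i - x| ∧ |i - x| < M)))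
        (fun q => q.2)]
  rw [PySem.List.enumerate_eq_map_pyRange (d := 0), List.map_map]
  simp only [PySem.List.len_eq]
  congr 1
  set R : Int := (row.length : Int) with hR
  have hmap : ((PySem.List.pyRange 0 R 1).map
      ((fun q : Int × Int => if i < N ∧ q.1 < N ∧
          ((i = x ∧ 0 < |q.1 - y| ∧ |q.1 - y| < M) ∨ (q.1 = y ∧ 0 < |i - x| ∧ |i - x| < M))
        then q.2 else 0) ∘ (fun j => (j, PySem.List.pyGetD row j 0))))
      = (PySem.List.pyRange 0 R 1).map (fun j =>
          (if (i = x ∧ x < N) ∧ (max 0 (y - M + 1) ≤ j ∧ j < min y N)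
             then PySem.List.pyGetD row j 0 else 0)
          + (if (i = x ∧ x < N) ∧ (max (y+1) 0 ≤ j ∧ j < min N (y + M))
             then PySem.List.pyGetD row j 0 else 0)
          + (if (0 ≤ y ∧ y < N ∧ i < N ∧ 0 < |i - x| ∧ |i - x| < M) ∧ (y ≤ j ∧ j < y + 1)
             then PySem.List.pyGetD row j 0 else 0)) := by
    apply List.map_congr_left
    intro j hj
    obtain ⟨hj0, hjR⟩ := (PySem.List.mem_pyRange_one).mp hj
    simp only [Function.comp_apply]
    have habs1 : (0 < |j - y| ∧ |j - y| < M) ↔ (j ≠ y ∧ y - M < j ∧ j < y + M) := by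
      rw [abs_pos, sub_ne_zero, abs_lt]; omega
    have habs2 : (0 < |i - x| ∧ |i - x| < M) ↔ (i ≠ x ∧ x - M < i ∧ i < x + M) := by
      rw [abs_pos, sub_ne_zero, abs_lt]; omega
    have hiff : (i < N ∧ j < N ∧
          ((i = x ∧ 0 < |j - y| ∧ |j - y| < M) ∨ (j = y ∧ 0 < |i - x| ∧ |i - x| < M)))
        ↔ (((i = x ∧ x < N) ∧ (max 0 (y - M + 1) ≤ j ∧ j < min y N))
            ∨ ((i = x ∧ x < N) ∧ (max (y+1) 0 ≤ j ∧ j < min N (y + M))))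
          ∨ ((0 ≤ y ∧ y < N ∧ i < N ∧ 0 < |i - x| ∧ |i - x| < M) ∧ (y ≤ j ∧ j < y + 1)) := by
      rw [habs1, habs2]
      omega
    rw [if_congr hiff rfl rfl]
    rw [ite_or_add _ _ (by
          rintro ⟨hrow, ⟨⟨_, _, _, h2, _⟩, _⟩⟩
          rw [abs_pos, sub_ne_zero] at h2
          rcases hrow with ⟨⟨rfl, _⟩, _⟩ | ⟨⟨rfl, _⟩, _⟩ <;> exact h2 rfl)]
    rw [ite_or_add _ _ (by rintro ⟨⟨_, _, h1⟩, ⟨_, h2, _⟩⟩; omega)]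
  rw [hmap]
  rw [show (fun j => (if (i = x ∧ x < N) ∧ (max 0 (y - M + 1) ≤ j ∧ j < min y N)
             then PySem.List.pyGetD row j 0 else 0)
          + (if (i = x ∧ x < N) ∧ (max (y+1) 0 ≤ j ∧ j < min N (y + M))
             then PySem.List.pyGetD row j 0 else 0)
          + (if (0 ≤ y ∧ y < N ∧ i < N ∧ 0 < |i - x| ∧ |i - x| < M) ∧ (y ≤ j ∧ j < y + 1)
             then PySem.List.pyGetD row j 0 else 0))
        = fun j => ((if (i = x ∧ x < N) ∧ (max 0 (y - M + 1) ≤ j ∧ j < min y N)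
             then PySem.List.pyGetD row j 0 else 0)
          + (if (i = x ∧ x < N) ∧ (max (y+1) 0 ≤ j ∧ j < min N (y + M))
             then PySem.List.pyGetD row j 0 else 0))
          + (if (0 ≤ y ∧ y < N ∧ i < N ∧ 0 < |i - x| ∧ |i - x| < M) ∧ (y ≤ j ∧ j < y + 1)
             then PySem.List.pyGetD row j 0 else 0) from rfl]
  rw [List.sum_map_add, List.sum_map_add]
  unfold rowC
  have hpad : ∀ j, R ≤ j → PySem.List.pyGetD row j 0 = 0 := fun j hj => pyGetD_oob row j 0 hj
  congr 1
  · -- the two row-x interval sums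
    by_cases hix : i = x ∧ x < N
    · rw [sum_ind _ _ R (max 0 (y - M + 1)) (min y N)
            (fun j h1 h2 => ⟨fun h => h.2, fun h => ⟨hix, h⟩⟩)
            (by omega) hpad,
          sum_ind _ _ R (max (y+1) 0) (min N (y + M))
            (fun j h1 h2 => ⟨fun h => h.2, fun h => ⟨hix, h⟩⟩)
            (by omega) hpad,
          if_pos hix]
      rfl
    · rw [sum_range_zero _ _ _ (fun j h1 h2 => if_neg (fun hc => hix hc.1)),
          sum_range_zero _ _ _ (fun j h1 h2 => if_neg (fun hc => hix hc.1)),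
          if_neg hix]
      simp
  · -- the column indicator at j = y
    by_cases hc : 0 ≤ y ∧ y < N ∧ i < N ∧ 0 < |i - x| ∧ |i - x| < M
    · rw [sum_ind _ _ R y (y + 1)
            (fun j h1 h2 => ⟨fun h => h.2, fun h => ⟨hc, h⟩⟩)
            hc.1 hpad,
          if_pos hc, PySem.List.pyRange_one_singleton]
      simp
    · rw [sum_range_zero _ _ _ (fun j h1 h2 => if_neg (fun hcc => hc hcc.1)), if_neg hc]

-- B equals the common closed form
lemma b_eq_common (N M : Int) (arr : List (List Int)) (x y : Int) :
    spray_plus_alt N M arr x y = common N M arr x y := by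
  unfold spray_plus_alt
  rw [foldl_eq_add_sum _ (fun p : Int × List Int => rowC N M x y p.1 p.2)
      (PySem.List.enumerate arr 0)
      (fun t p hp => by
        have hi : 0 ≤ p.1 := by
          obtain ⟨k, hk, rfl⟩ := (PySem.List.mem_enumerate_iff _ _ _).mp hp
          omega
        exact inner_row N M x y p.1 p.2 hi t)]
  rw [PySem.List.enumerate_eq_map_pyRange (d := []), List.map_map]
  simp only [PySem.List.len_eq]
  set L : Int := (arr.length : Int) with hL
  have hmap : ((PySem.List.pyRange 0 L 1).map
      ((fun p : Int × List Int => rowC N M x y p.1 p.2) ∘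
        (fun i => (i, PySem.List.pyGetD arr i []))))
      = (PySem.List.pyRange 0 L 1).map (fun i =>
          (if i = x ∧ x < N then hTermL N M (PySem.List.pyGetD arr i []) y
              + hTermR N M (PySem.List.pyGetD arr i []) y else 0)
          + (if 0 ≤ y ∧ y < N ∧ i < N ∧ 0 < |i - x| ∧ |i - x| < M
             then PySem.List.pyGetD (PySem.List.pyGetD arr i []) y 0 else 0)) := by
    apply List.map_congr_left; intro i _; rfl
  rw [hmap, List.sum_map_add]
  have hrow0 : ∀ j : Int, PySem.List.pyGetD ([] : List Int) j 0 = 0 := fun j => pyGetD_nil j 0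
  have hA : ((PySem.List.pyRange 0 L 1).map (fun i =>
        if i = x ∧ x < N then hTermL N M (PySem.List.pyGetD arr i []) y
            + hTermR N M (PySem.List.pyGetD arr i []) y else 0)).sum
      = if 0 ≤ x ∧ x < N then hTermL N M (PySem.List.pyGetD arr x []) y
            + hTermR N M (PySem.List.pyGetD arr x []) y else 0 := by
    by_cases hgx : 0 ≤ x ∧ x < N
    · rw [if_pos hgx]
      by_cases hxL : x < L
      · rw [sum_pick_y L x _ hgx.1 hxL
            (fun i h1 h2 hne => if_neg (by intro hcon; exact hne hcon.1))]
        simp [hgx.2]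
      · rw [sum_range_zero _ _ _ (fun i h1 h2 => if_neg (by intro hcon; omega))]
        have hnil : PySem.List.pyGetD arr x [] = [] := pyGetD_oob arr x [] (by omega)
        rw [hnil]
        unfold hTermL hTermR
        rw [sum_range_zero _ _ _ (fun j h1 h2 => hrow0 j),
            sum_range_zero _ _ _ (fun j h1 h2 => hrow0 j)]
        simp
    · rw [if_neg hgx,
          sum_range_zero _ _ _ (fun i h1 h2 => if_neg (by intro hcon; exact hgx ⟨by omega, hcon.2⟩))]
  have hB : ((PySem.List.pyRange 0 L 1).map (fun i =>
        if 0 ≤ y ∧ y < N ∧ i < N ∧ 0 < |i - x| ∧ |i - x| < M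
        then PySem.List.pyGetD (PySem.List.pyGetD arr i []) y 0 else 0)).sum
      = if 0 ≤ y ∧ y < N then vTermU N M arr x y + vTermD N M arr x y else 0 := by
    by_cases hgy : 0 ≤ y ∧ y < N
    · rw [if_pos hgy]
      have hpadc : ∀ i, L ≤ i → pvCell arr i y = 0 := fun i hiL => by
        unfold pvCell
        rw [pyGetD_oob arr i [] (by omega), hrow0]
      rw [sum_range_congr 0 L _ (fun i =>
            (if max 0 (x - M + 1) ≤ i ∧ i < min x N then pvCell arr i y else 0)
            + (if max (x+1) 0 ≤ i ∧ i < min N (x + M) then pvCell arr i y else 0))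
          (fun i h1 h2 => by
            have hiff : (0 ≤ y ∧ y < N ∧ i < N ∧ 0 < |i - x| ∧ |i - x| < M)
                ↔ ((max 0 (x - M + 1) ≤ i ∧ i < min x N)
                    ∨ (max (x+1) 0 ≤ i ∧ i < min N (x + M))) := by
              rw [abs_pos, sub_ne_zero, abs_lt]
              omega
            simp only []
            rw [if_congr hiff rfl rfl,
                ite_or_add _ _ (by rintro ⟨⟨_, h1⟩, h2, _⟩; omega)
                  (PySem.List.pyGetD (PySem.List.pyGetD arr i []) y 0)]
            rfl),
          List.sum_map_add,
          sum_ind (fun i => pvCell arr i y) _ L (max 0 (x - M + 1)) (min x N)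
            (fun i h1 h2 => Iff.rfl) (by omega) hpadc,
          sum_ind (fun i => pvCell arr i y) _ L (max (x+1) 0) (min N (x + M))
            (fun i h1 h2 => Iff.rfl) (by omega) hpadc]
      rfl
    · rw [if_neg hgy,
          sum_range_zero _ _ _ (fun i h1 h2 => if_neg (by intro hcon; exact hgy ⟨hcon.1, hcon.2.1⟩))]
  rw [hA, hB]
  unfold common
  ring

-- ===== VERDICT (by name: the statement is the Claim_ definition above) =====
theorem spray_plus_spec : Claim_equal_spray_plus := by
  intro N M arr x y _ hpre
  obtain ⟨_, _, _, _, hEx1, hEy1, hEx2, hEy2, _, _, _⟩ := hpre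
  unfold Spec_spray_plus
  rw [a_eq_common N M arr x y hEx1 hEy1 hEx2 hEy2, b_eq_common N M arr x y]
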